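-- pv_equiv track=rewrite | github.com/MrBrantCode/unitest_baseline | mut_generate/mist_train_cf/cf_84164/solution.py | custom_blender
-- ===== SOURCE A (Python) =====
-- from typing import Tuple
--
-- def custom_blender(s1: str, s2: str, s3: str) -> Tuple[str, int]:
--     """
--     Intersperse characters from all three input strings alternately, ignore numeric characters and count the number of bypassed characters.
--     Output the final string and append the count of bypassed characters at the end.
--     """
--     res = []
--     bypassed = 0
--     strings = [iter(s) for s in [s1, s2, s3]]
--     while strings:
--         for s in strings[:]:
--             try:
--                 c = next(s)
--                 if c.isnumeric():
--                     bypassed += 1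
--                 else:
--                     res.append(c)
--             except StopIteration:
--                 strings.remove(s)
--     return ''.join(res), bypassed
-- ===== SOURCE B (Python) =====
-- def custom_blender(s1, s2, s3):
--     """Column-indexed rewrite: walk positions 0..max(len)-1 and within each
--     column take the chars of s1, s2, s3 in order, counting digits instead of
--     emitting them."""
--     res = []
--     bypassed = 0
--     for i in range(max(len(s1), len(s2), len(s3))):
--         for s in (s1, s2, s3):
--             if i < len(s):
--                 c = s[i]
--                 if c.isnumeric():
--                     bypassed += 1
--                 else:
--                     res.append(c)
--     return ''.join(res), bypassed
-- ===== Notes on version B (the rewrite author's own statement) =====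
-- stated objective: simpler
-- what changed: Replaces the list-of-iterators with removal-during-iteration by a plain index loop over column positions 0..max(len)-1, reading each string directly with a bounds check.
import Mathlib
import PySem

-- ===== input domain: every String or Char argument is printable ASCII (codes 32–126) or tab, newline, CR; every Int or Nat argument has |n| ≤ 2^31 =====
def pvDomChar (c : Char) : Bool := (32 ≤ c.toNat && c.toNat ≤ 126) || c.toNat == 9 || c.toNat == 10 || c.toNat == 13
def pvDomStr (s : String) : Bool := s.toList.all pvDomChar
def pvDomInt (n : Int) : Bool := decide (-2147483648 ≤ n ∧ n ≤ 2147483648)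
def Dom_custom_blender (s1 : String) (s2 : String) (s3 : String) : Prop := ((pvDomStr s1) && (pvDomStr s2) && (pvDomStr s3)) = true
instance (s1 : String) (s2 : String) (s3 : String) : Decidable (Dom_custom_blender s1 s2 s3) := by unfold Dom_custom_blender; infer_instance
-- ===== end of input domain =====

-- B replaces A's list-of-iterators-with-removal by a plain index loop over the
-- column positions 0..max(len)-1 (objective: simpler, same cost).
-- c.isnumeric() is ported as PySem.Chars.isdigit, exact on the ASCII domain Dom_.

-- ===== PORT A =====
-- one execution of `for s in strings[:]`: an exhausted iterator is removed,
-- otherwise its next char is consumed (digits counted, others emitted);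
-- returns (emitted chars, bypassed count, surviving advanced iterators)
def pvPassA : List (List Char) → List Char × Int × List (List Char)
  | [] => ([], 0, [])
  | [] :: rest => pvPassA rest
  | (c :: s') :: rest =>
      let r := pvPassA rest
      if PySem.Chars.isdigit c then (r.1, r.2.1 + 1, s' :: r.2.2)
      else (c :: r.1, r.2.1, s' :: r.2.2)

def pvMeas (ls : List (List Char)) : Nat := (ls.map List.length).sum + ls.length

theorem pvPassA_meas_le (ls : List (List Char)) : pvMeas (pvPassA ls).2.2 ≤ pvMeas ls := by
  induction ls with
  | nil => simp [pvPassA]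
  | cons s rest ih =>
      cases s with
      | nil => simp [pvPassA, pvMeas] at *; omega
      | cons c s' =>
          by_cases h : PySem.Chars.isdigit c = true <;>
            simp [pvPassA, pvMeas, h] at * <;> omega

theorem pvPassA_meas (ls : List (List Char)) (h : ls ≠ []) :
    pvMeas (pvPassA ls).2.2 < pvMeas ls := by
  cases ls with
  | nil => exact absurd rfl h
  | cons s rest =>
      have hr := pvPassA_meas_le rest
      cases s with
      | nil => simp [pvPassA, pvMeas] at *; omega
      | cons c s' =>
          by_cases hd : PySem.Chars.isdigit c = true <;>
            simp [pvPassA, pvMeas, hd] at * <;> omega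

-- the `while strings:` loop
def pvLoopA (ls : List (List Char)) : List Char × Int :=
  if h : ls = [] then ([], 0)
  else
    let p := pvPassA ls
    let r := pvLoopA p.2.2
    (p.1 ++ r.1, p.2.1 + r.2)
  termination_by pvMeas ls
  decreasing_by exact pvPassA_meas ls h

def custom_blender (s1 : String) (s2 : String) (s3 : String) : String × Int :=
  let r := pvLoopA [s1.toList, s2.toList, s3.toList]
  (String.mk r.1, r.2)

-- ===== PORT B =====
-- body of `if i < len(s): ...` for one string at column i
def pvStepB (l : List Char) (i : Nat) (acc : List Char × Int) : List Char × Int :=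
  if h : i < l.length then
    let c := l[i]
    if PySem.Chars.isdigit c then (acc.1, acc.2 + 1) else (acc.1 ++ [c], acc.2)
  else acc

def custom_blender_alt (s1 : String) (s2 : String) (s3 : String) : String × Int :=
  let a := s1.toList
  let b := s2.toList
  let c := s3.toList
  let r := (List.range (max (max a.length b.length) c.length)).foldl
    (fun acc i => pvStepB c i (pvStepB b i (pvStepB a i acc))) ([], 0)
  (String.mk r.1, r.2)

-- ===== PRECONDITION & SPEC =====
def Spec_custom_blender (s1 : String) (s2 : String) (s3 : String) (out : String × Int) : Prop := out = custom_blender_alt s1 s2 s3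
instance (s1 : String) (s2 : String) (s3 : String) (out : String × Int) : Decidable (Spec_custom_blender s1 s2 s3 out) := by unfold Spec_custom_blender; infer_instance

-- ===== CLAIM (what is proved, stated in full; the proofs are below) =====
def Claim_equal_custom_blender : Prop := ∀ (s1 : String) (s2 : String) (s3 : String), Dom_custom_blender s1 s2 s3 → Spec_custom_blender s1 s2 s3 (custom_blender s1 s2 s3)

-- ===== LEMMAS AND PROOFS =====

def pvStep3 (a b c : List Char) (acc : List Char × Int) (i : Nat) : List Char × Int :=
  pvStepB c i (pvStepB b i (pvStepB a i acc))

def pvFoldB (a b c : List Char) : List Char × Int :=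
  (List.range (max (max a.length b.length) c.length)).foldl (pvStep3 a b c) ([], 0)

theorem pvPassA_filter (ls : List (List Char)) :
    pvPassA (ls.filter (fun l => !l.isEmpty)) = pvPassA ls := by
  induction ls with
  | nil => rfl
  | cons s rest ih =>
      cases s with
      | nil => simpa [pvPassA] using ih
      | cons c s' => simp [pvPassA, ih]

theorem pvPassA_allEmpty (ls : List (List Char)) (h : ∀ l ∈ ls, l = []) :
    pvPassA ls = ([], 0, []) := by
  induction ls with
  | nil => rfl
  | cons s rest ih =>
      have hs : s = [] := h s (by simp)
      subst hs
      exact (by simpa [pvPassA] using ih (fun l hl => h l (by simp [hl])))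

theorem pvLoopA_nil : pvLoopA [] = ([], 0) := by
  rw [pvLoopA]; simp

theorem pvLoopA_filter (ls : List (List Char)) :
    pvLoopA ls = pvLoopA (ls.filter (fun l => !l.isEmpty)) := by
  by_cases hf : ls.filter (fun l => !l.isEmpty) = []
  · have hall : ∀ l ∈ ls, l = [] := by
      intro l hl
      by_contra hne
      have hmem : l ∈ ls.filter (fun l => !l.isEmpty) :=
        List.mem_filter.2 ⟨hl, by simp [List.isEmpty_iff, hne]⟩
      simp [hf] at hmem
    rw [hf, pvLoopA_nil]
    cases hls : ls with
    | nil => exact pvLoopA_nil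
    | cons s rest =>
        rw [pvLoopA, dif_neg (by simp : s :: rest ≠ [])]
        rw [pvPassA_allEmpty (s :: rest) (hls ▸ hall)]
        simp [pvLoopA_nil]
  · have hlsne : ls ≠ [] := by intro h; simp [h] at hf
    rw [pvLoopA, pvLoopA, dif_neg hlsne, dif_neg hf, pvPassA_filter]

theorem pvStepB_succ (l : List Char) (i : Nat) (acc : List Char × Int) :
    pvStepB l (i + 1) acc = pvStepB l.tail i acc := by
  cases l with
  | nil => simp [pvStepB]
  | cons x t => simp [pvStepB]

theorem pvStepB_shift (l : List Char) (i : Nat) (x p : List Char) (m q : Int) :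
    pvStepB l i (x ++ p, m + q) = (x ++ (pvStepB l i (p, q)).1, m + (pvStepB l i (p, q)).2) := by
  unfold pvStepB
  by_cases h1 : i < l.length
  · simp only [dif_pos h1]
    by_cases hd : PySem.Chars.isdigit (l[i]'h1) = true <;>
      simp [hd, List.append_assoc, Int.add_assoc]
  · simp only [dif_neg h1]

theorem pvStep3_shift (a b c : List Char) (acc : List Char × Int) (i : Nat) :
    pvStep3 a b c acc i = (acc.1 ++ (pvStep3 a b c ([], 0) i).1, acc.2 + (pvStep3 a b c ([], 0) i).2) := by
  unfold pvStep3
  conv_lhs => rw [show acc = (acc.1 ++ ([] : List Char), acc.2 + (0 : Int)) by simp]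
  rw [pvStepB_shift, pvStepB_shift, pvStepB_shift]

theorem pvFold_hom (a b c : List Char) (is : List Nat) (acc : List Char × Int) :
    is.foldl (pvStep3 a b c) acc =
      (acc.1 ++ (is.foldl (pvStep3 a b c) ([], 0)).1, acc.2 + (is.foldl (pvStep3 a b c) ([], 0)).2) := by
  induction is generalizing acc with
  | nil => simp
  | cons i is ih =>
      simp only [List.foldl_cons]
      rw [ih (pvStep3 a b c acc i), ih (pvStep3 a b c ([], 0) i),
          pvStep3_shift a b c acc i]
      simp [List.append_assoc, Int.add_assoc]

theorem pass_eq_col (a b c : List Char) :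
    (pvPassA [a, b, c]).1 = (pvStep3 a b c ([], 0) 0).1 ∧
    (pvPassA [a, b, c]).2.1 = (pvStep3 a b c ([], 0) 0).2 := by
  rcases a with _ | ⟨x, a'⟩ <;> rcases b with _ | ⟨y, b'⟩ <;> rcases c with _ | ⟨z, c'⟩ <;>
    simp [pvPassA, pvStep3, pvStepB] <;> split_ifs <;> simp

theorem pass_st (a b c : List Char) :
    (pvPassA [a, b, c]).2.2.filter (fun l => !l.isEmpty) =
      ([a.tail, b.tail, c.tail] : List (List Char)).filter (fun l => !l.isEmpty) := by
  rcases a with _ | ⟨x, a'⟩ <;> rcases b with _ | ⟨y, b'⟩ <;> rcases c with _ | ⟨z, c'⟩ <;>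
    simp [pvPassA] <;> split_ifs <;> simp [List.filter_cons]

theorem pvBase : pvLoopA [([] : List Char), [], []] = pvFoldB [] [] [] := by
  rw [pvLoopA, dif_neg (by simp : ([([] : List Char), [], []]) ≠ [])]
  simp [pvPassA, pvLoopA_nil, pvFoldB]

theorem pvMain (n : Nat) : ∀ (a b c : List Char), a.length + b.length + c.length ≤ n →
    pvLoopA [a, b, c] = pvFoldB a b c := by
  induction n with
  | zero =>
      intro a b c h
      have ha : a = [] := List.length_eq_zero_iff.mp (by omega)
      have hb : b = [] := List.length_eq_zero_iff.mp (by omega)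
      have hc : c = [] := List.length_eq_zero_iff.mp (by omega)
      subst ha; subst hb; subst hc; exact pvBase
  | succ n ih =>
      intro a b c hlen
      by_cases hall : a = [] ∧ b = [] ∧ c = []
      · obtain ⟨ha, hb, hc⟩ := hall
        subst ha; subst hb; subst hc; exact pvBase
      · have hpos : 0 < a.length + b.length + c.length := by
          rcases Nat.eq_zero_or_pos (a.length + b.length + c.length) with h0 | h
          · exact absurd ⟨List.length_eq_zero_iff.mp (by omega),
              List.length_eq_zero_iff.mp (by omega),
              List.length_eq_zero_iff.mp (by omega)⟩ hall
          · exact h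
        obtain ⟨m, hm⟩ : ∃ m, max (max a.length b.length) c.length = m + 1 :=
          ⟨max (max a.length b.length) c.length - 1, by omega⟩
        have htails : max (max a.tail.length b.tail.length) c.tail.length = m := by
          simp only [List.length_tail]; omega
        have hrec : pvLoopA [a.tail, b.tail, c.tail] = pvFoldB a.tail b.tail c.tail := by
          apply ih
          simp only [List.length_tail]; omega
        have hstep : (fun (acc : List Char × Int) (i : Nat) => pvStep3 a b c acc (i + 1)) =
            pvStep3 a.tail b.tail c.tail := by
          funext acc i
          simp [pvStep3, pvStepB_succ]
        have hRHS : pvFoldB a b c =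
            ((pvStep3 a b c ([], 0) 0).1 ++ (pvFoldB a.tail b.tail c.tail).1,
             (pvStep3 a b c ([], 0) 0).2 + (pvFoldB a.tail b.tail c.tail).2) := by
          unfold pvFoldB
          rw [hm, htails, List.range_succ_eq_map, List.foldl_cons, List.foldl_map]
          simp only [Nat.succ_eq_add_one]
          rw [hstep, pvFold_hom]
        have hcol := pass_eq_col a b c
        have hst : pvLoopA (pvPassA [a, b, c]).2.2 = pvFoldB a.tail b.tail c.tail := by
          rw [pvLoopA_filter, pass_st, ← pvLoopA_filter, hrec]
        rw [pvLoopA, dif_neg (by simp : ([a, b, c] : List (List Char)) ≠ []), hRHS]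
        simp only [hst, hcol.1, hcol.2]

theorem custom_blender_spec : Claim_equal_custom_blender := by
  intro s1 s2 s3 _
  unfold Spec_custom_blender custom_blender custom_blender_alt
  have h := pvMain (s1.toList.length + s2.toList.length + s3.toList.length)
      s1.toList s2.toList s3.toList (le_refl _)
  rw [h]
  rfl
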